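-- pv_equiv track=rewrite | github.com/eerimoq/asn1tools | asn1tools/codecs/ber.py | decode_signed_integer
-- ===== SOURCE A (Python) =====
-- def decode_signed_integer(data):
--     value = 0
--     is_negative = (data[0] & 0x80)
--
--     for byte in data:
--         value <<= 8
--         value += byte
--
--     if is_negative:
--         value -= (1 << (8 * len(data)))
--
--     return value
-- ===== SOURCE B (Python) =====
-- def decode_signed_integer(data):
--     head = data[0]
--     if head & 0x80:
--         head -= 256
--     value = 0
--     weight = 1
--     for byte in reversed(data[1:]):
--         value += byte * weight
--         weight *= 256
--     return head * weight + value
-- ===== Notes on version B (the rewrite author's own statement) =====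
-- stated objective: alternative
-- what changed: B interprets the leading byte as a signed digit (subtracting 256 when its sign bit is set) and sums the remaining bytes back-to-front with an explicit positional weight, instead of A's left-to-right shift-accumulate over all bytes followed by a 2^(8*len) subtraction.
import Mathlib
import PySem

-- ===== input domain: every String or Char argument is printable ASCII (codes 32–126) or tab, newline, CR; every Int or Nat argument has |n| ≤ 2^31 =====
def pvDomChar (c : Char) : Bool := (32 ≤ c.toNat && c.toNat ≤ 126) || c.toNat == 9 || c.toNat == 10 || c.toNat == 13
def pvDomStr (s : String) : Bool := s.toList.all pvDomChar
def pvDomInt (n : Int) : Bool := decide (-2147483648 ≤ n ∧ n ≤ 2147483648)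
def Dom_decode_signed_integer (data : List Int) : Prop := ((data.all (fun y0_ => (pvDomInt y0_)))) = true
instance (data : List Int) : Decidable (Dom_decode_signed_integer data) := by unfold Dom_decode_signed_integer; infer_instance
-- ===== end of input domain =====

-- B interprets the head byte as a signed digit and sums the tail back-to-front with a
-- positional weight, instead of A's left-to-right shift-accumulate plus final subtraction.

-- ===== PORT A =====
def decode_signed_integer (data : List Int) : Int :=
  let value : Int := 0
  let is_negative : Int := PySem.Int.band (((PySem.List.pyGet? data 0)).getD 0) 0x80
  let value : Int := data.foldl (fun v byte => (v <<< (8 : Nat)) + byte) value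
  if is_negative ≠ 0 then value - ((1 : Int) <<< (8 * data.length)) else value

-- ===== PORT B =====
def decode_signed_integer_alt (data : List Int) : Int :=
  let head0 : Int := (PySem.List.pyGet? data 0).getD 0
  let head : Int := if PySem.Int.band head0 0x80 ≠ 0 then head0 - 256 else head0
  let vw : Int × Int :=
    ((PySem.List.slice data (some 1) none).reverse).foldl
      (fun vw byte => (vw.1 + byte * vw.2, vw.2 * 256)) (0, 1)
  head * vw.2 + vw.1

-- ===== PRECONDITION & SPEC =====
-- Pre_ excludes exactly the empty list, on which Python's data[0] raises IndexError (both A and B).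
def Pre_decode_signed_integer (data : List Int) : Prop := data ≠ []
instance (data : List Int) : Decidable (Pre_decode_signed_integer data) := by
  unfold Pre_decode_signed_integer; infer_instance
def pvWitness_decode_signed_integer : List Int := [255, 1]

def Spec_decode_signed_integer (data : List Int) (out : Int) : Prop := out = decode_signed_integer_alt data
instance (data : List Int) (out : Int) : Decidable (Spec_decode_signed_integer data out) := by unfold Spec_decode_signed_integer; infer_instance

-- ===== CLAIM (what is proved, stated in full; the proofs are below) =====
def Claim_equal_decode_signed_integer : Prop := ∀ (data : List Int), Dom_decode_signed_integer data → Pre_decode_signed_integer data → Spec_decode_signed_integer data (decode_signed_integer data)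

-- ===== LEMMAS AND PROOFS =====

-- the shift-accumulate loop body is multiplication by 256
theorem pv_step_eq (v byte : Int) : (v <<< (8 : Nat)) + byte = v * 256 + byte := by
  rw [Int.shiftLeft_eq]; norm_num

-- shifting the seed out of A's fold
theorem pv_foldl_seed (data : List Int) (s : Int) :
    data.foldl (fun (v byte : Int) => (v <<< (8 : Nat)) + byte) s
      = s * (256 : Int) ^ data.length + data.foldl (fun (v byte : Int) => (v <<< (8 : Nat)) + byte) 0 := by
  induction data generalizing s with
  | nil => simp
  | cons a t ih =>
    simp only [List.foldl_cons, List.length_cons]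
    rw [ih ((s <<< (8 : Nat)) + a), ih (((0 : Int) <<< (8 : Nat)) + a), pv_step_eq, pv_step_eq]
    ring

-- B's reversed weighted fold computes exactly A's shift fold from 0, with weight 256^len
theorem pv_rev_fold (t : List Int) :
    t.reverse.foldl (fun (vw : Int × Int) byte => (vw.1 + byte * vw.2, vw.2 * 256)) (0, 1)
      = (t.foldl (fun (v byte : Int) => (v <<< (8 : Nat)) + byte) 0, (256 : Int) ^ t.length) := by
  induction t with
  | nil => simp
  | cons a t ih =>
    simp only [List.reverse_cons, List.foldl_append, ih, List.foldl_cons, List.foldl_nil,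
      List.length_cons, Prod.mk.injEq]
    refine ⟨?_, ?_⟩
    · rw [pv_foldl_seed t (((0 : Int) <<< (8 : Nat)) + a), pv_step_eq]
      ring
    · ring

-- ===== VERDICT (by name: the statement is the Claim_ definition above) =====
theorem decode_signed_integer_spec : Claim_equal_decode_signed_integer := by
  intro data _ hne
  show decode_signed_integer data = decode_signed_integer_alt data
  obtain ⟨h, t, rfl⟩ := List.exists_cons_of_ne_nil hne
  unfold decode_signed_integer decode_signed_integer_alt
  simp only [PySem.List.slice_from_one, List.tail_cons, pv_rev_fold]
  have hget : (PySem.List.pyGet? (h :: t) 0).getD 0 = h := by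
    simp [PySem.List.pyGet?, PySem.List.pyIdx?]
  rw [hget]
  have hA : List.foldl (fun (v byte : Int) => (v <<< (8 : Nat)) + byte) 0 (h :: t)
      = h * (256 : Int) ^ t.length + List.foldl (fun (v byte : Int) => (v <<< (8 : Nat)) + byte) 0 t := by
    simp only [List.foldl_cons]
    rw [pv_foldl_seed t (((0 : Int) <<< (8 : Nat)) + h), pv_step_eq]
    ring
  have hpow : ((1 : Int) <<< (8 * (h :: t).length)) = 256 * (256 : Int) ^ t.length := by
    rw [List.length_cons, Int.shiftLeft_eq, pow_mul]
    norm_num [pow_succ]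
    ring
  rw [hA, hpow]
  split_ifs with hc <;> ring
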